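-- pv_equiv track=rewrite | github.com/SimplicityGuy/pynoc | pynoc/cisco.py | _verify_poe_status
-- ===== SOURCE A (Python) =====
-- def _verify_poe_status(output, port, state):
--     """Verify that the given port is in the given state.
--
--     :param output: the output of the command
--         Module   Available     Used     Remaining
--                   (Watts)     (Watts)    (Watts)
--         ------   ---------   --------   ---------
--         1           740.0      138.6       601.4
--         Interface Admin  Oper       Power   Device              Class Max
--                                     (Watts)
--         --------- ------ ---------- ------- ------------------- ----- ----
--         Gi1/0/1   auto   off        0.0     n/a                 n/a   15.4
--         Gi1/0/2   auto   on         0.0     n/a                 n/a   15.4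
--         Gi1/0/3   off    off        0.0     n/a                 n/a   15.4
--     :param port: port to check
--     :param state: expected state
--     :return: (True, actual state) if the port is in the expected state,
--     (False, actual state) otherwise
--     """
--     if "on" in state:
--         state = "auto"
--
--     matches = False
--     lines = [line.strip() for line in output.splitlines()]
--     lines.append('')
--     actual_state = "unknown"
--     while len(lines) > 0:
--         line = lines.pop(0)
--
--         # Table entries will always have a '/' for the interface.
--         # If there isn't one it's not a row we care about.
--         if line.find('/') < 0:
--             continue
--
--         values = [entry for entry in line.split() if entry]
--
--         if values[0] == port:
--             matches = state in values[1]
--             actual_state = values[1]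
--             break
--
--     return matches, actual_state
-- ===== SOURCE B (Python) =====
-- def _verify_poe_status(output, port, state):
--     """Table-building re-implementation: one pass builds a first-wins
--     port->state dict, then a single lookup decides the result."""
--     if "on" in state:
--         state = "auto"
--     table = {}
--     for raw in output.splitlines():
--         line = raw.strip()
--         if '/' not in line:
--             continue
--         fields = line.split()
--         if len(fields) >= 2:
--             table.setdefault(fields[0], fields[1])
--     if port in table:
--         actual = table[port]
--         return state in actual, actual
--     return False, "unknown"
-- ===== Notes on version B (the rewrite author's own statement) =====
-- stated objective: alternative
-- what changed: A's break-on-first-match while/pop(0) scan is replaced by a single pass that builds a first-wins port->state dict with setdefault, followed by one dict lookup to decide the result.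
import Mathlib
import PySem

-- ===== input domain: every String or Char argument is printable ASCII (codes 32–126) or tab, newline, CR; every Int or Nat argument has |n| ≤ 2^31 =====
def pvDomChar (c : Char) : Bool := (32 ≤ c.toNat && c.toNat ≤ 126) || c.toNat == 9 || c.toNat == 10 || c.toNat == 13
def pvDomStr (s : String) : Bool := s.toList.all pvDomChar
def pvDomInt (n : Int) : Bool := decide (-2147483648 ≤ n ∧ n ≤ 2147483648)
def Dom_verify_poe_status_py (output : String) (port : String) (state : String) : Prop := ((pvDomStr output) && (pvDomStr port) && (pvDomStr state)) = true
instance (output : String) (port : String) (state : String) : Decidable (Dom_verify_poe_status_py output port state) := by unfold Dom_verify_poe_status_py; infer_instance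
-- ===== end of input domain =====

-- B replaces A's break-on-first-match scan by a first-wins table build plus one dict lookup (objective: alternative, same cost).

-- ===== PORT A =====
-- A's while/pop(0) loop, transliterated as structural recursion over the line list.
def pvLoopA (port state : String) : List String → Bool × String
  | [] => (false, "unknown")
  | line :: rest =>
    if PySem.Str.find line "/" < 0 then pvLoopA port state rest
    else
      match (PySem.Str.split₀ line).filter (fun e => e ≠ "") with
      | [] => pvLoopA port state rest  -- unreachable: a line containing '/' always splits into ≥ 1 field
      | v0 :: vrest =>
        if v0 = port then
          match vrest with
          | [] => (false, "unknown")  -- Python raises IndexError at values[1]; excluded by Pre_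
          | v1 :: _ => (PySem.Str.isIn state v1, v1)
        else pvLoopA port state rest

def verify_poe_status_py (output : String) (port : String) (state : String) : Bool × String :=
  let state' := if PySem.Str.isIn "on" state then "auto" else state
  let lines := ((PySem.Str.splitlines output).map (fun l => PySem.Str.strip l)) ++ [""]
  pvLoopA port state' lines

-- ===== PORT B =====
-- the body of B's table-building loop, after `line = raw.strip()`
def pvStep (d : PySem.Dict String String) (line : String) : PySem.Dict String String :=
  if !(PySem.Str.isIn "/" line) then d
  else
    match PySem.Str.split₀ line with
    | f0 :: f1 :: _ => PySem.Dict.setdefault d f0 f1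
    | _ => d

-- one iteration of B's loop on the raw line
def pvStepB (d : PySem.Dict String String) (raw : String) : PySem.Dict String String :=
  pvStep d (PySem.Str.strip raw)

def verify_poe_status_py_alt (output : String) (port : String) (state : String) : Bool × String :=
  let state' := if PySem.Str.isIn "on" state then "auto" else state
  let table := (PySem.Str.splitlines output).foldl pvStepB PySem.Dict.empty
  match PySem.Dict.get? table port with
  | some actual => (PySem.Str.isIn state' actual, actual)
  | none => (false, "unknown")

-- ===== PRECONDITION & SPEC =====
-- pvRowP port l: l is a table row A matches for `port` (contains '/', first field = port)
def pvRowP (port : String) (l : String) : Bool :=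
  PySem.Str.isIn "/" l && ((PySem.Str.split₀ l).head? == some port)

-- Pre_ excludes exactly the inputs where A raises IndexError: the first matching row has fewer than two fields.
def Pre_verify_poe_status_py (output : String) (port : String) (state : String) : Prop :=
  (Option.all (fun l => decide (2 ≤ (PySem.Str.split₀ l).length))
    (((PySem.Str.splitlines output).map PySem.Str.strip).find? (pvRowP port))) = true
instance (output : String) (port : String) (state : String) : Decidable (Pre_verify_poe_status_py output port state) := by unfold Pre_verify_poe_status_py; infer_instance

def pvWitness_verify_poe_status_py : String × String × String := ("Gi1/0/1 auto on", "Gi1/0/1", "on")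

def Spec_verify_poe_status_py (output : String) (port : String) (state : String) (out : Bool × String) : Prop := out = verify_poe_status_py_alt output port state
instance (output : String) (port : String) (state : String) (out : Bool × String) : Decidable (Spec_verify_poe_status_py output port state out) := by unfold Spec_verify_poe_status_py; infer_instance

-- ===== CLAIM (what is proved, stated in full; the proofs are below) =====
def Claim_equal_verify_poe_status_py : Prop := ∀ (output : String) (port : String) (state : String), Dom_verify_poe_status_py output port state → Pre_verify_poe_status_py output port state → Spec_verify_poe_status_py output port state (verify_poe_status_py output port state)


-- ===== LEMMAS AND PROOFS =====

-- A's test `line.find('/') < 0` is the complement of B's `'/' in line`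
lemma pv_find_neg_iff (l : String) : (PySem.Str.find l "/" < 0) ↔ (PySem.Str.isIn "/" l = false) := by
  have hge := PySem.Chars.neg_one_le_find l.toList "/".toList
  have h1 := PySem.Chars.find_eq_neg_one_iff l.toList "/".toList
  have h2 := PySem.Chars.isIn_eq_false_iff "/".toList l.toList
  rw [PySem.Str.find_eq, PySem.Str.isIn_eq]
  constructor
  · intro h; exact h2.mpr (h1.mp (by omega))
  · intro h; have := h1.mpr (h2.mp h); omega

-- no member of split₀ is empty (Chars level, over the accumulating worker)
lemma pv_go_mem_ne_nil (s : List Char) : ∀ (cur : List Char) (acc : List (List Char)),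
    (∀ x ∈ acc, x ≠ []) → ∀ x ∈ PySem.Chars.split₀.go s cur acc, x ≠ [] := by
  induction s with
  | nil =>
    intro cur acc hacc x hx
    simp only [PySem.Chars.split₀.go] at hx
    split at hx
    · exact hacc x (List.mem_reverse.mp hx)
    · rename_i hcur
      rw [List.mem_reverse, List.mem_cons] at hx
      rcases hx with h | h
      · subst h; simp only [ne_eq, List.reverse_eq_nil_iff]
        simpa [List.isEmpty_iff] using hcur
      · exact hacc x h
  | cons c rest ih =>
    intro cur acc hacc x hx
    simp only [PySem.Chars.split₀.go] at hx
    split at hx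
    · split at hx
      · exact ih [] acc hacc x hx
      · rename_i hcur
        refine ih [] (cur.reverse :: acc) ?_ x hx
        intro y hy
        rcases List.mem_cons.mp hy with h | h
        · subst h; simp only [ne_eq, List.reverse_eq_nil_iff]
          simpa [List.isEmpty_iff] using hcur
        · exact hacc y h
    · exact ih (c :: cur) acc hacc x hx

lemma pv_mem_split₀_ne_empty (l : String) (x : String) (hx : x ∈ PySem.Str.split₀ l) : x ≠ "" := by
  have hmem : x.toList ∈ PySem.Chars.split₀ l.toList := by
    rw [← PySem.Str.split₀_map_toList]
    exact List.mem_map_of_mem hx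
  have hne : x.toList ≠ [] := by
    have := pv_go_mem_ne_nil l.toList [] [] (by simp)
    simpa [PySem.Chars.split₀] using this x.toList (by simpa [PySem.Chars.split₀] using hmem)
  intro h; subst h; exact hne rfl

-- A's `[entry for entry in line.split() if entry]` filter is the identity
lemma pv_filter_split₀ (l : String) :
    (PySem.Str.split₀ l).filter (fun e => e ≠ "") = PySem.Str.split₀ l := by
  apply List.filter_eq_self.mpr
  intro a ha
  simpa using pv_mem_split₀_ne_empty l a ha

-- the worker returns a nonempty list once something is pending
lemma pv_go_ne_nil (s : List Char) : ∀ (cur : List Char) (acc : List (List Char)),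
    (cur ≠ [] ∨ acc ≠ []) → PySem.Chars.split₀.go s cur acc ≠ [] := by
  induction s with
  | nil =>
    intro cur acc h
    simp only [PySem.Chars.split₀.go]
    split
    · rename_i hcur
      rcases h with h | h
      · exact absurd (List.isEmpty_iff.mp hcur) h
      · simpa using h
    · simp
  | cons c rest ih =>
    intro cur acc h
    simp only [PySem.Chars.split₀.go]
    split
    · split
      · rename_i hcur
        refine ih [] acc (Or.inr ?_)
        rcases h with h | h
        · exact absurd (List.isEmpty_iff.mp hcur) h
        · exact h
      · exact ih [] (cur.reverse :: acc) (Or.inr (by simp))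
    · exact ih (c :: cur) acc (Or.inl (by simp))

-- a line holding a non-space character splits into at least one field
lemma pv_go_ne_nil_of_nonspace (s : List Char) : ∀ (cur : List Char) (acc : List (List Char))
    (c : Char), c ∈ s → PySem.Chars.isspace c = false →
    PySem.Chars.split₀.go s cur acc ≠ [] := by
  induction s with
  | nil => intro _ _ _ hc _; exact absurd hc (List.not_mem_nil)
  | cons c' rest ih =>
    intro cur acc c hc hns
    simp only [PySem.Chars.split₀.go]
    split
    · rename_i hsp
      have hcr : c ∈ rest := by
        rcases List.mem_cons.mp hc with h | h
        · subst h; rw [hsp] at hns; cases hns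
        · exact h
      split
      · exact ih [] acc c hcr hns
      · exact ih [] (cur.reverse :: acc) c hcr hns
    · exact pv_go_ne_nil rest (c' :: cur) acc (Or.inl (by simp))

lemma pv_split₀_ne_nil (l : String) (h : PySem.Str.isIn "/" l = true) :
    PySem.Str.split₀ l ≠ [] := by
  have hinf : "/".toList <:+: l.toList := by
    rw [PySem.Str.isIn_eq, PySem.Chars.isIn_iff_infix] at h
    exact h
  have hmem : '/' ∈ l.toList := hinf.subset (by decide)
  have hchars : PySem.Chars.split₀ l.toList ≠ [] := by
    simpa [PySem.Chars.split₀] using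
      pv_go_ne_nil_of_nonspace l.toList [] [] '/' hmem (by decide)
  intro hnil
  apply hchars
  rw [← PySem.Str.split₀_map_toList, hnil, List.map_nil]

-- pvStep never disturbs a key already present
lemma pv_step_preserve (d : PySem.Dict String String) (line k : String) (v : String)
    (h : d.get? k = some v) : (pvStep d line).get? k = some v := by
  unfold pvStep
  split
  · exact h
  · split
    · rename_i f0 f1 _ _
      rcases hc : d.contains f0 with _ | _
      · rw [PySem.Dict.setdefault_of_not_contains d f1 hc]
        have hk : k ≠ f0 := by
          intro he; subst he
          rw [PySem.Dict.contains_eq_isSome_get?, h] at hc; cases hc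
        rw [PySem.Dict.get?_insert_of_ne d f1 hk]; exact h
      · rw [PySem.Dict.setdefault_of_contains d f1 hc]; exact h
    · exact h

lemma pv_fold_preserve (ls : List String) (d : PySem.Dict String String) (k v : String)
    (h : d.get? k = some v) : (ls.foldl pvStep d).get? k = some v := by
  induction ls generalizing d with
  | nil => exact h
  | cons l rest ih => exact ih (pvStep d l) (pv_step_preserve d l k v h)

-- A's scan over the stripped lines = lookup in B's table, for any start dict not containing port
lemma pv_loop_eq_table (port state : String) (ls : List String) (d : PySem.Dict String String)
    (hd : d.contains port = false)
    (hp : (Option.all (fun l => decide (2 ≤ (PySem.Str.split₀ l).length)) (ls.find? (pvRowP port))) = true) :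
    pvLoopA port state ls =
      (match (ls.foldl pvStep d).get? port with
       | some a => (PySem.Str.isIn state a, a)
       | none => (false, "unknown")) := by
  induction ls generalizing d with
  | nil =>
    simp only [pvLoopA, List.foldl_nil]
    rw [(PySem.Dict.get?_eq_none_iff_contains d port).mpr hd]
  | cons line rest ih =>
    by_cases hin : PySem.Str.isIn "/" line = true
    · have hf : ¬ (PySem.Str.find line "/" < 0) := by
        rw [pv_find_neg_iff, hin]; simp
      rcases hsp : PySem.Str.split₀ line with _ | ⟨f0, fs⟩
      · exact absurd hsp (pv_split₀_ne_nil line hin)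
      simp only [pvLoopA, if_neg hf, List.foldl_cons]
      rw [pv_filter_split₀, hsp]
      dsimp only
      have hstep : pvStep d line = (match (f0 :: fs : List String) with
          | f0 :: f1 :: _ => PySem.Dict.setdefault d f0 f1
          | _ => d) := by
        unfold pvStep; rw [hsp, hin]; rfl
      by_cases hf0 : f0 = port
      · rw [if_pos hf0]
        have hrow : pvRowP port line = true := by
          unfold pvRowP; rw [hin, hsp]; simp [hf0]
        rw [List.find?_cons_of_pos hrow] at hp
        simp only [Option.all_some, decide_eq_true_eq, hsp, List.length_cons] at hp
        rcases fs with _ | ⟨f1, fs'⟩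
        · simp at hp
        · subst hf0
          have hget : (pvStep d line).get? f0 = some f1 := by
            rw [hstep]; dsimp only
            rw [PySem.Dict.setdefault_of_not_contains d f1 hd,
              PySem.Dict.get?_insert_self]
          rw [pv_fold_preserve rest (pvStep d line) f0 f1 hget]
      · rw [if_neg hf0]
        have hrow : pvRowP port line = false := by
          unfold pvRowP; rw [hin, hsp]; simp [hf0]
        rw [List.find?_cons_of_neg (by simp [hrow])] at hp
        have hd' : (pvStep d line).contains port = false := by
          rw [hstep]
          rcases fs with _ | ⟨f1, fs'⟩
          · dsimp only; exact hd
          · dsimp only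
            rw [PySem.Dict.contains_setdefault]
            simp [hd, Ne.symm hf0]
        exact ih (pvStep d line) hd' hp
    · have hin' : PySem.Str.isIn "/" line = false := by simpa using hin
      have hf : PySem.Str.find line "/" < 0 := by
        rw [pv_find_neg_iff]; exact hin'
      have hrow : pvRowP port line = false := by
        unfold pvRowP; rw [hin']; simp
      rw [List.find?_cons_of_neg (by simp [hrow])] at hp
      have hstep : pvStep d line = d := by
        unfold pvStep; rw [hin']; simp
      simp only [pvLoopA, if_pos hf, List.foldl_cons, hstep]
      exact ih d hd hp

-- the sentinel '' line A appends is skipped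
lemma pv_loop_append_empty (port state : String) (ls : List String) :
    pvLoopA port state (ls ++ [""]) = pvLoopA port state ls := by
  induction ls with
  | nil =>
    simp only [List.nil_append, pvLoopA]
    rw [if_pos (by decide)]
  | cons line rest ih =>
    by_cases h : PySem.Str.find line "/" < 0
    · simp only [List.cons_append, pvLoopA, if_pos h]; exact ih
    · simp only [List.cons_append, pvLoopA, if_neg h]
      rcases hv : (PySem.Str.split₀ line).filter (fun e => e ≠ "") with _ | ⟨v0, vrest⟩
      · exact ih
      · dsimp only
        by_cases h0 : v0 = port
        · rw [if_pos h0, if_pos h0]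
        · rw [if_neg h0, if_neg h0]; exact ih

-- ===== VERDICT (by name: the statement is the Claim_ definition above) =====
theorem verify_poe_status_py_spec : Claim_equal_verify_poe_status_py := by
  intro output port state _ hpre
  unfold Pre_verify_poe_status_py at hpre
  unfold Spec_verify_poe_status_py verify_poe_status_py verify_poe_status_py_alt
  dsimp only
  rw [pv_loop_append_empty]
  have hfold : (PySem.Str.splitlines output).foldl pvStepB PySem.Dict.empty
      = ((PySem.Str.splitlines output).map PySem.Str.strip).foldl pvStep PySem.Dict.empty := by
    rw [List.foldl_map]; rfl
  rw [hfold]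
  exact pv_loop_eq_table port _ _ PySem.Dict.empty (PySem.Dict.contains_empty port) hpre
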